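-- pv_equiv track=rewrite | github.com/brandonharris177/edabit-challanges | index.py | mostFrequentDigitSum
-- ===== SOURCE A (Python) =====
-- def mostFrequentDigitSum(n):
--     hashTable = {}
--     number = 0
--     occorance = 0
--     while n > 0:
--         summation = 0
--         strN = str(n)
--         for value in strN:
--             summation+=int(value)
--         if summation not in hashTable:
--             hashTable[summation] = 0
--         hashTable[summation] += 1
--         if hashTable[summation] == occorance and summation > number:
--             number = summation
--         if hashTable[summation] > occorance:
--             number = summation
--             occorance = hashTable[summation]
--         n = n-int(summation)
--
--     return number
-- ===== SOURCE B (Python) =====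
-- def mostFrequentDigitSum(n):
--     traj = []
--     while n > 0:
--         s = sum(map(int, str(n)))
--         traj.append(s)
--         n -= s
--     traj.sort()
--     best, bestrun, run, prev = 0, 0, 0, None
--     for v in traj:
--         run = run + 1 if v == prev else 1
--         prev = v
--         if run >= bestrun:
--             best, bestrun = v, run
--     return best
-- ===== Notes on version B (the rewrite author's own statement) =====
-- stated objective: alternative
-- what changed: A maintains a hash table of counts plus an inline streaming argmax (best value and best count, two tie-break branches) while walking the n -= digitsum trajectory; B keeps no counting structure at all: it materializes the trajectory as a plain list, sorts it, and finds the mode by a single run-length scan over the sorted list, where scanning ascending with a >= comparison realizes the tie-break (max frequency, then largest value).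
import Mathlib
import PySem

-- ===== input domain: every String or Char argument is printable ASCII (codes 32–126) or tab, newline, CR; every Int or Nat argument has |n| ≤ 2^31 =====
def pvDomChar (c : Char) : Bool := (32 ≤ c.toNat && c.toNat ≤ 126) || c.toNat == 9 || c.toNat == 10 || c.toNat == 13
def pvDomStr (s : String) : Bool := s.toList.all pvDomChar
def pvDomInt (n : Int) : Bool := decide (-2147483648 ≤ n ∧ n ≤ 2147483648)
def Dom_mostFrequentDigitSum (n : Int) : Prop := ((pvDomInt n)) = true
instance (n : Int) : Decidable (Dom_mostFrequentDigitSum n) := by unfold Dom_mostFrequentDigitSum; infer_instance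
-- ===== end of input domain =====

-- B drops A's hash table and inline streaming argmax entirely: it materializes the trajectory
-- as a plain list, sorts it, and finds the mode by one run-length scan (ascending + ">=" gives
-- the tie-break: max frequency, then largest value).  Same task, different algorithm.

-- digit sum of n: `sum of int(value) for value in str(n)` — the subexpression both Pythons share.
-- `.getD 0` is unreachable: every character of str(n) for n > 0 is a digit.
def pvDigitSum (n : Int) : Int :=
  (PySem.Int.toChars n).foldl (fun acc c => acc + (PySem.Int.ofChars? [c]).getD 0) 0

-- ===== PORT A =====
-- while n > 0: digit sum, counter dict with explicit missing-key init, inline best update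
def pvLoopA (fuel : Nat) (n : Int) (hashTable : PySem.Dict Int Int)
    (number occorance : Int) : Int :=
  match fuel with
  | 0 => number
  | f + 1 =>
    if n > 0 then
      let summation := pvDigitSum n
      let h1 := if hashTable.contains summation then hashTable
                else hashTable.insert summation 0
      let h2 := h1.insert summation (h1.getD summation 0 + 1)
      let number1 := if h2.getD summation 0 = occorance ∧ summation > number
                     then summation else number
      let pr := if h2.getD summation 0 > occorance then (summation, h2.getD summation 0)
                else (number1, occorance)
      pvLoopA f (n - summation) h2 pr.1 pr.2
    else number

def mostFrequentDigitSum (n : Int) : Int :=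
  pvLoopA (n.toNat + 1) n PySem.Dict.empty 0 0

-- ===== PORT B =====
-- phase 1: walk the trajectory, appending each digit sum to a plain list
def pvBuild (fuel : Nat) (n : Int) (traj : List Int) : List Int :=
  match fuel with
  | 0 => traj
  | f + 1 =>
    if n > 0 then
      let s := pvDigitSum n
      pvBuild f (n - s) (traj ++ [s])
    else traj

-- phase 2 loop body: state (best, bestrun, run, prev); `v == prev` is `some v = prev`
def pvScanStep (st : Int × Int × Int × Option Int) (v : Int) : Int × Int × Int × Option Int :=
  match st with
  | (best, bestrun, run, prev) =>
    let run' := if some v = prev then run + 1 else 1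
    if run' ≥ bestrun then (v, run', run', some v) else (best, bestrun, run', some v)

def mostFrequentDigitSum_alt (n : Int) : Int :=
  let traj := pvBuild (n.toNat + 1) n []
  let s := PySem.List.sorted traj (fun x => x) false
  (s.foldl pvScanStep (0, 0, 0, none)).1

-- ===== PRECONDITION & SPEC =====
def Spec_mostFrequentDigitSum (n : Int) (out : Int) : Prop := out = mostFrequentDigitSum_alt n
instance (n : Int) (out : Int) : Decidable (Spec_mostFrequentDigitSum n out) := by unfold Spec_mostFrequentDigitSum; infer_instance

-- ===== CLAIM (what is proved, stated in full; the proofs are below) =====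
def Claim_equal_mostFrequentDigitSum : Prop := ∀ (n : Int), Dom_mostFrequentDigitSum n → Spec_mostFrequentDigitSum n (mostFrequentDigitSum n)

-- ===== LEMMAS AND PROOFS =====

-- the trajectory of digit sums (proof-side abstraction shared by both loop analyses)
def pvTraj (fuel : Nat) (n : Int) : List Int :=
  match fuel with
  | 0 => []
  | f + 1 => if n > 0 then pvDigitSum n :: pvTraj f (n - pvDigitSum n) else []

-- (num, occ) is "the" answer for multiset p: occ is the maximal multiplicity in p,
-- num the largest value attaining it (0,0 on []).
def pvIsBest (p : List Int) (num occ : Int) : Prop :=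
  (∀ v ∈ p, (p.count v : Int) ≤ occ) ∧
  (∀ v ∈ p, (p.count v : Int) = occ → v ≤ num) ∧
  (p = [] → num = 0 ∧ occ = 0) ∧
  (p ≠ [] → num ∈ p ∧ (p.count num : Int) = occ)

theorem pvCounter_append_singleton (p : List Int) (s : Int) :
    PySem.Dict.counter (p ++ [s])
      = (PySem.Dict.counter p).insert s ((PySem.Dict.counter p).getD s 0 + 1) := by
  rw [← PySem.Dict.foldl_insert_getD_add_one_eq_counter (p ++ [s]), List.foldl_append,
      PySem.Dict.foldl_insert_getD_add_one_eq_counter p]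
  simp [List.foldl]

theorem pvBuild_append (fuel : Nat) :
    ∀ (n : Int) (p : List Int), pvBuild fuel n p = p ++ pvTraj fuel n := by
  induction fuel with
  | zero => intro n p; simp [pvBuild, pvTraj]
  | succ f ih =>
    intro n p
    by_cases hn : n > 0
    · simp only [pvBuild, pvTraj, hn, if_pos]
      rw [ih (n - pvDigitSum n) (p ++ [pvDigitSum n]), List.append_assoc]
      rfl
    · simp [pvBuild, pvTraj, hn]

-- A's two dict statements (missing-key init, then increment) act as one counter bump
theorem pvDictA_step (d : PySem.Dict Int Int) (s : Int) :
    (let h1 := if d.contains s then d else d.insert s 0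
     h1.insert s (h1.getD s 0 + 1)) = d.insert s (d.getD s 0 + 1) := by
  by_cases h : d.contains s
  · simp [h]
  · simp only [h, Bool.false_eq_true, if_false]
    rw [PySem.Dict.getD_insert_self, PySem.Dict.insert_insert_self,
        PySem.Dict.getD_of_not_contains (h := by simpa using h)]

theorem pvCount_append_singleton (p : List Int) (s v : Int) :
    ((p ++ [s]).count v : Int) = (p.count v : Int) + (if v = s then 1 else 0) := by
  rcases eq_or_ne v s with h | h
  · simp [List.count_append, h]
  · simp [List.count_append, h, Ne.symm h]

-- one streaming step of A preserves pvIsBest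
theorem pvIsBest_step (p : List Int) (num occ s : Int) (h : pvIsBest p num occ) :
    pvIsBest (p ++ [s])
      (if ((p.count s : Int) + 1) > occ then s
       else if ((p.count s : Int) + 1) = occ ∧ s > num then s else num)
      (if ((p.count s : Int) + 1) > occ then (p.count s : Int) + 1 else occ) := by
  obtain ⟨h1, h2, h3, h4⟩ := h
  have hmem : ∀ v : Int, v ∈ p ++ [s] → v ≠ s → v ∈ p := by
    intro v hv hne
    rcases List.mem_append.1 hv with hp | hs
    · exact hp
    · simp at hs; exact absurd hs hne
  by_cases hgt : ((p.count s : Int) + 1) > occ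
  · simp only [hgt, if_pos]
    refine ⟨?_, ?_, ?_, ?_⟩
    · intro v hv
      rw [pvCount_append_singleton]
      split_ifs with hvs
      · subst hvs; omega
      · have := h1 v (hmem v hv hvs); omega
    · intro v hv hve
      rw [pvCount_append_singleton] at hve
      split_ifs at hve with hvs
      · exact le_of_eq hvs
      · have := h1 v (hmem v hv hvs); omega
    · intro hemp; simp at hemp
    · intro _
      refine ⟨by simp, ?_⟩
      rw [pvCount_append_singleton]; simp
  · simp only [hgt, if_false]
    have hle : ((p.count s : Int) + 1) ≤ occ := by omega
    have hpne : p ≠ [] := by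
      intro hp; subst hp
      have := h3 rfl; simp at hle; omega
    obtain ⟨hnum_mem, hnum_cnt⟩ := h4 hpne
    refine ⟨?_, ?_, ?_, ?_⟩
    · intro v hv
      rw [pvCount_append_singleton]
      split_ifs with hvs
      · subst hvs; omega
      · have := h1 v (hmem v hv hvs); omega
    · intro v hv hve
      rw [pvCount_append_singleton] at hve
      split_ifs with hcond
      · obtain ⟨hco1, hco2⟩ := hcond
        split_ifs at hve with hvs
        · omega
        · have := h2 v (hmem v hv hvs) (by omega)
          omega
      · split_ifs at hve with hvs
        · subst hvs; omega
        · exact h2 v (hmem v hv hvs) (by omega)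
    · intro hemp; simp at hemp
    · intro _
      split_ifs with hcond
      · refine ⟨by simp, ?_⟩
        rw [pvCount_append_singleton]; simp; omega
      · refine ⟨List.mem_append.2 (Or.inl hnum_mem), ?_⟩
        have hnums : num ≠ s := by
          intro he; subst he; omega
        rw [pvCount_append_singleton]
        simp [hnums]; omega

-- the answer encoded by pvIsBest is unique (the occ component is pinned too)
theorem pvIsBest_unique (p : List Int) (a o b o' : Int)
    (h : pvIsBest p a o) (h' : pvIsBest p b o') : a = b := by
  obtain ⟨h1, h2, h3, h4⟩ := h
  obtain ⟨h1', h2', h3', h4'⟩ := h'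
  rcases eq_or_ne p [] with hp | hp
  · rw [(h3 hp).1, (h3' hp).1]
  · obtain ⟨ham, hac⟩ := h4 hp
    obtain ⟨hbm, hbc⟩ := h4' hp
    have hoo : o = o' := by
      have := h1 b hbm
      have := h1' a ham
      omega
    have hba : b ≤ a := h2 b hbm (by omega)
    have hab : a ≤ b := h2' a ham (by omega)
    omega

-- pvIsBest only depends on the multiset of p
theorem pvIsBest_perm (s p : List Int) (a o : Int) (hperm : s.Perm p)
    (h : pvIsBest s a o) : pvIsBest p a o := by
  obtain ⟨h1, h2, h3, h4⟩ := h
  have hcnt : ∀ v : Int, p.count v = s.count v := fun v => (hperm.count_eq v).symm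
  have hmem : ∀ v : Int, v ∈ p ↔ v ∈ s := fun v => hperm.mem_iff.symm
  refine ⟨?_, ?_, ?_, ?_⟩
  · intro v hv; rw [hcnt]; exact h1 v ((hmem v).1 hv)
  · intro v hv hve; rw [hcnt] at hve; exact h2 v ((hmem v).1 hv) hve
  · intro hp
    have : s = [] := by
      have := hperm.length_eq; rw [hp] at this; simpa using List.eq_nil_of_length_eq_zero this
    exact h3 this
  · intro hp
    have hs : s ≠ [] := by
      intro he; subst he
      exact hp (List.eq_nil_of_length_eq_zero (by simpa using hperm.length_eq.symm))
    obtain ⟨hm, hc⟩ := h4 hs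
    exact ⟨(hmem a).2 hm, by rw [hcnt]; exact hc⟩

-- B's run-length scan over a sorted list maintains pvIsBest of the processed prefix
theorem pvScan_inv (l : List Int) : ∀ (q : List Int) (best bestrun run : Int) (prev : Option Int),
    (q ++ l).Pairwise (· ≤ ·) →
    pvIsBest q best bestrun →
    (q = [] → prev = none) →
    (q ≠ [] → ∃ x, prev = some x ∧ x ∈ q ∧ run = (q.count x : Int) ∧ ∀ y ∈ q, y ≤ x) →
    ∃ o, pvIsBest (q ++ l) (l.foldl pvScanStep (best, bestrun, run, prev)).1 o := by
  induction l with
  | nil =>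
    intro q best bestrun run prev _ hbest _ _
    exact ⟨bestrun, by simpa using hbest⟩
  | cons v l' ih =>
    intro q best bestrun run prev hsorted hbest hnil hne
    have hq_le_v : ∀ y ∈ q, y ≤ v := by
      intro y hy
      have := (List.pairwise_append.1 hsorted).2.2
      exact this y hy v (by simp)
    -- the new run equals the count of v in q++[v]
    have hrun' : (if some v = prev then run + 1 else 1) = (q.count v : Int) + 1 := by
      split_ifs with hpv
      · rcases eq_or_ne q [] with hq | hq
        · rw [hnil hq] at hpv; cases hpv
        · obtain ⟨x, hx1, _, hx3, _⟩ := hne hq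
          rw [hx1] at hpv
          have : x = v := by injection hpv.symm
          rw [hx3, this]
      · have hvq : v ∉ q := by
          intro hv
          rcases eq_or_ne q [] with hq | hq
          · subst hq; simp at hv
          · obtain ⟨x, hx1, hx2, _, hx4⟩ := hne hq
            have h1 : v ≤ x := hx4 v hv
            have h2 : x ≤ v := hq_le_v x hx2
            have : x = v := le_antisymm h2 h1
            subst this
            exact hpv (by rw [hx1])
        rw [List.count_eq_zero_of_not_mem hvq]; simp
    -- B's step result equals A's step result, so pvIsBest transfers
    have hstep := pvIsBest_step q best bestrun v hbest
    have hB : pvIsBest (q ++ [v])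
        (if (q.count v : Int) + 1 ≥ bestrun then v else best)
        (if (q.count v : Int) + 1 ≥ bestrun then (q.count v : Int) + 1 else bestrun) := by
      rcases lt_trichotomy ((q.count v : Int) + 1) bestrun with hlt | heq | hgt
      · rw [if_neg (by omega), if_neg (by omega)]
        rw [if_neg (show ¬ ((q.count v : Int) + 1 > bestrun) by omega),
            if_neg (show ¬ ((q.count v : Int) + 1 > bestrun) by omega),
            if_neg (show ¬ ((q.count v : Int) + 1 = bestrun ∧ v > best) by
              rintro ⟨h1, h2⟩; omega)] at hstep
        exact hstep
      · rw [if_pos (by omega), if_pos (by omega)]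
        rw [if_neg (show ¬ ((q.count v : Int) + 1 > bestrun) by omega),
            if_neg (show ¬ ((q.count v : Int) + 1 > bestrun) by omega)] at hstep
        have hA' : (if (q.count v : Int) + 1 = bestrun ∧ v > best then v else best) = v := by
          split_ifs with hc
          · rfl
          · -- v ≤ best forces best = v (best ∈ q, everything in q is ≤ v)
            have hqne : q ≠ [] := by
              intro hq; subst hq
              have := (hbest.2.2.1 rfl).2
              simp at heq; omega
            obtain ⟨hbm, _⟩ := hbest.2.2.2 hqne
            have h1 : best ≤ v := hq_le_v best hbm
            have h2 : ¬ v > best := fun hv => hc ⟨heq, hv⟩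
            omega
        rw [hA'] at hstep
        rw [heq]
        exact hstep
      · rw [if_pos (by omega), if_pos (by omega)]
        rw [if_pos (show (q.count v : Int) + 1 > bestrun by omega),
            if_pos (show (q.count v : Int) + 1 > bestrun by omega)] at hstep
        exact hstep
    -- fold one step, then apply the induction hypothesis with q := q ++ [v]
    have happ : q ++ v :: l' = (q ++ [v]) ++ l' := by simp
    rw [happ] at hsorted ⊢
    simp only [List.foldl_cons, pvScanStep]
    rw [hrun']
    have hside : (q ++ [v]) ≠ [] → ∃ x, (some v : Option Int) = some x ∧ x ∈ q ++ [v] ∧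
        ((q.count v : Int) + 1) = ((q ++ [v]).count x : Int) ∧ ∀ y ∈ q ++ [v], y ≤ x := by
      intro _
      refine ⟨v, rfl, by simp, ?_, ?_⟩
      · rw [pvCount_append_singleton]; simp
      · intro y hy
        rcases List.mem_append.1 hy with h | h
        · exact hq_le_v y h
        · simp at h; omega
    by_cases hge : (q.count v : Int) + 1 ≥ bestrun
    · rw [if_pos hge]
      rw [if_pos hge, if_pos hge] at hB
      exact ih (q ++ [v]) v _ _ (some v) hsorted hB (by simp) hside
    · rw [if_neg hge]
      rw [if_neg hge, if_neg hge] at hB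
      exact ih (q ++ [v]) best bestrun _ (some v) hsorted hB (by simp) hside

-- A's loop produces a pvIsBest answer for the whole trajectory
theorem pvLoopA_best (fuel : Nat) :
    ∀ (n : Int) (p : List Int) (num occ : Int), pvIsBest p num occ →
      ∃ o, pvIsBest (p ++ pvTraj fuel n)
        (pvLoopA fuel n (PySem.Dict.counter p) num occ) o := by
  induction fuel with
  | zero =>
    intro n p num occ h
    exact ⟨occ, by simpa [pvLoopA, pvTraj] using h⟩
  | succ f ih =>
    intro n p num occ h
    by_cases hn : n > 0
    · simp only [pvLoopA, pvTraj, hn, if_pos]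
      have happ : p ++ pvDigitSum n :: pvTraj f (n - pvDigitSum n)
          = (p ++ [pvDigitSum n]) ++ pvTraj f (n - pvDigitSum n) := by simp
      rw [pvDictA_step, ← pvCounter_append_singleton, PySem.Dict.getD_counter, happ]
      have hcnt : ((List.count (pvDigitSum n) (p ++ [pvDigitSum n]) : Int))
          = (p.count (pvDigitSum n) : Int) + 1 := by
        rw [pvCount_append_singleton]; simp
      rw [hcnt]
      have hstep := pvIsBest_step p num occ (pvDigitSum n) h
      by_cases hgt : (p.count (pvDigitSum n) : Int) + 1 > occ
      · simp only [hgt, if_pos] at hstep ⊢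
        exact ih (n - pvDigitSum n) (p ++ [pvDigitSum n]) _ _ hstep
      · simp only [hgt, if_false] at hstep ⊢
        exact ih (n - pvDigitSum n) (p ++ [pvDigitSum n]) _ _ hstep
    · simp only [pvLoopA, pvTraj, hn, if_false, List.append_nil]
      exact ⟨occ, h⟩

-- ===== VERDICT (by name: the statement is the Claim_ definition above) =====
theorem mostFrequentDigitSum_spec : Claim_equal_mostFrequentDigitSum := by
  intro n _
  unfold Spec_mostFrequentDigitSum mostFrequentDigitSum mostFrequentDigitSum_alt
  have hbest0 : pvIsBest [] 0 0 :=
    ⟨by simp, by simp, fun _ => ⟨rfl, rfl⟩, fun h => absurd rfl h⟩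
  -- A's side
  have hA := pvLoopA_best (n.toNat + 1) n [] 0 0 hbest0
  rw [show PySem.Dict.counter ([] : List Int) = PySem.Dict.empty from rfl,
      List.nil_append] at hA
  obtain ⟨oA, hA⟩ := hA
  -- B's side
  rw [pvBuild_append, List.nil_append]
  set t := pvTraj (n.toNat + 1) n with ht
  set s := PySem.List.sorted t (fun x => x) false with hs
  have hsorted : s.Pairwise (· ≤ ·) := by
    have := PySem.List.sorted_pairwise (xs := t) (key := fun x => x)
    simpa [hs] using this
  have hperm : s.Perm t := PySem.List.sorted_perm t (fun x => x) false
  have hB := pvScan_inv s [] 0 0 0 none (by simpa using hsorted) hbest0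
      (fun _ => rfl) (fun hne => absurd rfl hne)
  simp only [List.nil_append] at hB
  obtain ⟨oB, hB⟩ := hB
  exact pvIsBest_unique t _ oA _ oB hA (pvIsBest_perm s t _ oB hperm hB)
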